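-- pv_equiv track=rewrite | github.com/Jepi1202/master_thesis | code/experimental/pysr/gam/display_weights_evol.py | compute_string_products
-- ===== SOURCE A (Python) =====
-- import itertools
--
-- def compute_string_products(strings, degree):
--     """
--     Compute all polynomial products up to a given degree for a list of strings.
--
--     Args:
--         strings (list of str): The input list of strings.
--         degree (int): The maximum degree of the polynomial terms.
--
--     Returns:
--         list of str: A list containing all polynomial products.
--     """
--     num_variables = len(strings)
--     products = []
--
--     for d in range(1, degree + 1):
--         for combo in itertools.combinations_with_replacement(range(num_variables), d):
--             # Create a product string by joining the corresponding strings
--             product = ''.join([strings[i] for i in combo])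
--             products.append(product)
--
--     return products
-- ===== SOURCE B (Python) =====
-- def compute_string_products(strings, degree):
--     """Bottom-up by degree: each level holds (product_string, last_index) pairs,
--     so prefixes are reused instead of re-joining every combination."""
--     n = len(strings)
--     products = []
--     level = [(strings[i], i) for i in range(n)]
--     for d in range(1, degree + 1):
--         products.extend(s for s, _ in level)
--         if d < degree:
--             level = [(s + strings[j], j) for s, last in level for j in range(last, n)]
--     return products
-- ===== Notes on version B (the rewrite author's own statement) =====
-- stated objective: alternative
-- what changed: Replaces itertools.combinations_with_replacement index tuples (joined per combination) with a bottom-up level construction that extends (product_string, last_index) pairs degree by degree, reusing prefix strings.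
import Mathlib
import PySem

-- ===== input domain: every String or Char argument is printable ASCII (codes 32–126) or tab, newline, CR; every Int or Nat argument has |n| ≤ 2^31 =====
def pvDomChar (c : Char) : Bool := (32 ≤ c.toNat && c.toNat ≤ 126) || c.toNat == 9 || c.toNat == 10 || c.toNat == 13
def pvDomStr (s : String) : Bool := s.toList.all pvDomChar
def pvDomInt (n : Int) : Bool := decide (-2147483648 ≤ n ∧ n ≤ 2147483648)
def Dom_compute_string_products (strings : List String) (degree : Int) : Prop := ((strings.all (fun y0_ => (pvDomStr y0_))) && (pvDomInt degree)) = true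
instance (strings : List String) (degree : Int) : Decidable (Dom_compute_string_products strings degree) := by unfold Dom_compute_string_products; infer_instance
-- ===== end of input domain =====

-- B builds the products bottom-up by degree, extending (product, last-index) pairs, instead of joining an index tuple per combination (objective: alternative decomposition).

-- ===== PORT A =====
-- itertools.combinations_with_replacement(range(n), d): all non-decreasing index
-- tuples of length d over 0..n-1 in lexicographic order (the library's documented output).
def cwr (n : Nat) : (d : Nat) → (start : Nat) → List (List Nat)
  | 0, _ => [[]]
  | d+1, start => (List.range' start (n - start)).flatMap (fun i => (cwr n d i).map (i :: ·))

def compute_string_products (strings : List String) (degree : Int) : List String :=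
  -- the appending double loop, as a flatMap over d = 1..degree; every index i is < len(strings), so getD is exact
  (List.range' 1 degree.toNat).flatMap (fun d =>
    (cwr strings.length d 0).map (fun combo => String.join (combo.map (fun i => strings.getD i ""))))

-- ===== PORT B =====
-- one expansion step: extend every (product, last) by each j in range(last, n)
def cspStep (strings : List String) (n : Nat) (lvl : List (String × Nat)) : List (String × Nat) :=
  lvl.flatMap (fun p => (List.range' p.2 (n - p.2)).map (fun j => (p.1 ++ strings.getD j "", j)))

-- the for-loop over d = 1..degree: emit the level's strings; build the next level unless d = degree
def cspGo (strings : List String) (n : Nat) : Nat → List (String × Nat) → List String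
  | 0, _ => []
  | 1, lvl => lvl.map Prod.fst
  | k+2, lvl => lvl.map Prod.fst ++ cspGo strings n (k+1) (cspStep strings n lvl)

def compute_string_products_alt (strings : List String) (degree : Int) : List String :=
  cspGo strings strings.length degree.toNat
    ((List.range strings.length).map (fun i => (strings.getD i "", i)))

-- ===== PRECONDITION & SPEC =====
def Spec_compute_string_products (strings : List String) (degree : Int) (out : List String) : Prop := out = compute_string_products_alt strings degree
instance (strings : List String) (degree : Int) (out : List String) : Decidable (Spec_compute_string_products strings degree out) := by unfold Spec_compute_string_products; infer_instance

-- ===== CLAIM (what is proved, stated in full; the proofs are below) =====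
def Claim_equal_compute_string_products : Prop := ∀ (strings : List String) (degree : Int), Dom_compute_string_products strings degree → Spec_compute_string_products strings degree (compute_string_products strings degree)

-- ===== LEMMAS AND PROOFS =====

theorem flatMap_single {α β : Type} (l : List α) (f : α → β) :
    l.flatMap (fun x => [f x]) = l.map f := by
  induction l <;> simp_all

-- join of the strings indexed by a combo, and the (product, last-index) pair B carries
def joinOf (strings : List String) (c : List Nat) : String :=
  String.join (c.map (fun i => strings.getD i ""))

def gPair (strings : List String) (c : List Nat) : String × Nat :=
  (joinOf strings c, c.getLast?.getD 0)

theorem joinOf_concat (strings : List String) (c : List Nat) (j : Nat) :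
    joinOf strings (c ++ [j]) = joinOf strings c ++ strings.getD j "" := by
  simp [joinOf, String.join, List.foldl_append]

-- snoc characterisation of cwr: extend each combo at the end by every j ≥ its last index
theorem cwr_snoc (n : Nat) (d : Nat) : ∀ start,
    cwr n (d+1) start = (cwr n d start).flatMap
      (fun c => (List.range' (c.getLast?.getD start) (n - c.getLast?.getD start)).map (fun j => c ++ [j])) := by
  induction d with
  | zero => intro start; simp [cwr, flatMap_single]
  | succ d ih =>
    intro start
    show (List.range' start (n - start)).flatMap (fun i => (cwr n (d+1) i).map (i :: ·)) = _
    conv_rhs => rw [show cwr n (d+1) start = (List.range' start (n - start)).flatMap (fun i => (cwr n d i).map (i :: ·)) from rfl]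
    rw [List.flatMap_assoc]
    refine List.flatMap_congr ?_
    intro i _
    rw [ih i, List.map_flatMap, List.flatMap_map]
    refine List.flatMap_congr ?_
    intro c _
    have hg : (i :: c).getLast?.getD start = c.getLast?.getD i := by
      cases c with
      | nil => simp
      | cons a t =>
        rw [List.getLast?_cons_cons]
        rcases hx : (a :: t).getLast? with _ | x
        · simp [List.getLast?_eq_none_iff] at hx
        · simp
    simp [Function.comp, hg, List.map_map]

theorem cspStep_map (strings : List String) (d : Nat) :
    cspStep strings strings.length ((cwr strings.length d 0).map (gPair strings))
      = (cwr strings.length (d+1) 0).map (gPair strings) := by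
  rw [cwr_snoc]
  simp only [cspStep, List.flatMap_map, List.map_flatMap]
  refine List.flatMap_congr ?_ ; intro c _
  simp only [gPair, List.map_map]
  refine List.map_congr_left ?_ ; intro j _
  simp [Function.comp, gPair, joinOf_concat]

theorem cspGo_succ (strings : List String) (n k : Nat) (lvl : List (String × Nat)) :
    cspGo strings n (k+1) lvl = lvl.map Prod.fst ++ cspGo strings n k (cspStep strings n lvl) := by
  cases k <;> simp [cspGo]

theorem cspGo_cwr (strings : List String) (k : Nat) : ∀ d,
    cspGo strings strings.length k ((cwr strings.length d 0).map (gPair strings))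
      = (List.range' d k).flatMap (fun e => (cwr strings.length e 0).map (joinOf strings)) := by
  induction k with
  | zero => intro d; simp [cspGo]
  | succ k ih =>
    intro d
    rw [cspGo_succ, cspStep_map, ih (d+1), List.range'_succ]
    simp [List.map_map, Function.comp, gPair]

theorem level1_eq (strings : List String) :
    (List.range strings.length).map (fun i => (strings.getD i "", i))
      = (cwr strings.length 1 0).map (gPair strings) := by
  simp [cwr, List.range_eq_range', flatMap_single, gPair, joinOf, String.join]

-- ===== VERDICT (by name: the statement is the Claim_ definition above) =====
theorem compute_string_products_spec : Claim_equal_compute_string_products := by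
  intro strings degree _
  show compute_string_products strings degree = compute_string_products_alt strings degree
  unfold compute_string_products compute_string_products_alt
  rw [level1_eq, cspGo_cwr]
  refine List.flatMap_congr ?_ ; intro d _
  refine List.map_congr_left ?_ ; intro c _
  simp [joinOf]
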